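-- pv_equiv track=rewrite | github.com/smit112/job-ready-10min-chunks | Agentic Config Research.app/Contents/Resources/src/processors/pdf_analyzer.py | _get_most_common_category
-- ===== SOURCE A (Python) =====
-- from typing import Dict, List, Any, Optional, Tuple
--
-- def _get_most_common_category(detected_errors: Dict[str, Any]) -> Optional[str]:
--     """Get the category with the most errors"""
--     if not detected_errors:
--         return None
--
--     category_counts = {}
--     for category, errors in detected_errors.items():
--         total_count = sum(error_data["count"] for error_data in errors.values())
--         category_counts[category] = total_count
--
--     return max(category_counts, key=category_counts.get) if category_counts else None
-- ===== SOURCE B (Python) =====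
-- def _get_most_common_category(detected_errors):
--     """Get the category with the most errors (rank all categories by a stable sort, take the top)"""
--     ranked = sorted(
--         detected_errors.items(),
--         key=lambda item: -sum(error_data["count"] for error_data in item[1].values()),
--     )
--     return ranked[0][0] if ranked else None
-- ===== Notes on version B (the rewrite author's own statement) =====
-- stated objective: alternative
-- what changed: B replaces A's dict-of-totals plus key-based argmax with a ranking: it stably sorts the items by negated total error count and returns the head category (stability keeps the first maximum in insertion order, matching max's tie-breaking).
import Mathlib
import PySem

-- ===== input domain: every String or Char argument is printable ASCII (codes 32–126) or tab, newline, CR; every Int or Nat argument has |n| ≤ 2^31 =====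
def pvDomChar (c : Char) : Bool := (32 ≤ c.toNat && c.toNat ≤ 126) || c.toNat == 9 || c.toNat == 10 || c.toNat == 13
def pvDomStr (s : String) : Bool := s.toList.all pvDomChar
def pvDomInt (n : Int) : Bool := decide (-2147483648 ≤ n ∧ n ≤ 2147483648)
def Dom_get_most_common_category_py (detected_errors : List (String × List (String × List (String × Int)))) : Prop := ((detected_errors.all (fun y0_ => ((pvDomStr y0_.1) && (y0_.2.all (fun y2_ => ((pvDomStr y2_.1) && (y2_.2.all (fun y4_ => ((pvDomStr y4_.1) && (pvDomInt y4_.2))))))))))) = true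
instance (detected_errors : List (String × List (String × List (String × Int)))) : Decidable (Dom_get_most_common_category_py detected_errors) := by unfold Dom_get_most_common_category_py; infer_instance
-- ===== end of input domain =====

-- B ranks categories by a stable sort on negated totals and takes the head, instead of A's dict-of-totals + key-argmax; same return value on Pre_ (objective: alternative).


-- ===== PORT A =====
-- error_data["count"] is ported as getD "count" 0; Pre_ requires the key, where Python would raise KeyError.
def get_most_common_category_py (detected_errors : List (String × List (String × List (String × Int)))) : Option String :=
  if detected_errors = [] then none
  else
    let category_counts : PySem.Dict String Int :=
      detected_errors.foldl
        (fun d p =>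
          d.insert p.1 (((p.2.map Prod.snd).map (fun error_data => (PySem.Dict.mk error_data).getD "count" 0)).sum))
        PySem.Dict.empty
    if category_counts.size ≠ 0 then
      PySem.List.max? category_counts.keys (fun k => category_counts.getD k 0)
    else none

-- ===== PORT B =====
-- sorted(detected_errors.items(), key=lambda item: -sum(...)) → PySem.List.sorted (stable); head of the ranking.
def get_most_common_category_py_alt (detected_errors : List (String × List (String × List (String × Int)))) : Option String :=
  let ranked :=
    PySem.List.sorted detected_errors
      (fun item => -(((item.2.map Prod.snd).map (fun error_data => (PySem.Dict.mk error_data).getD "count" 0)).sum)) false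
  match ranked with
  | [] => none
  | p :: _ => some p.1

-- ===== PRECONDITION & SPEC =====
-- Pre_ excludes association lists with duplicate keys at any dict level (no Python dict has them, so such lists
-- encode no Python input and A's overwrite order there would be accidental) and innermost dicts missing the key
-- "count", on which the Python A raises KeyError (B raises there too).
def Pre_get_most_common_category_py (detected_errors : List (String × List (String × List (String × Int)))) : Prop :=
  (detected_errors.map Prod.fst).Nodup ∧
  ∀ p ∈ detected_errors, (p.2.map Prod.fst).Nodup ∧
    ∀ q ∈ p.2, (q.2.map Prod.fst).Nodup ∧ "count" ∈ q.2.map Prod.fst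
instance (detected_errors : List (String × List (String × List (String × Int)))) : Decidable (Pre_get_most_common_category_py detected_errors) := by unfold Pre_get_most_common_category_py; infer_instance

def pvWitness_get_most_common_category_py : (List (String × List (String × List (String × Int)))) :=
  [("syntax", [("e1", [("count", 2)]), ("e2", [("count", 1)])]), ("logic", [("e3", [("count", 4)])])]

def Spec_get_most_common_category_py (detected_errors : List (String × List (String × List (String × Int)))) (out : Option String) : Prop := out = get_most_common_category_py_alt detected_errors
instance (detected_errors : List (String × List (String × List (String × Int)))) (out : Option String) : Decidable (Spec_get_most_common_category_py detected_errors out) := by unfold Spec_get_most_common_category_py; infer_instance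

-- ===== CLAIM (what is proved, stated in full; the proofs are below) =====
def Claim_equal_get_most_common_category_py : Prop := ∀ (detected_errors : List (String × List (String × List (String × Int)))), Dom_get_most_common_category_py detected_errors → Pre_get_most_common_category_py detected_errors → Spec_get_most_common_category_py detected_errors (get_most_common_category_py detected_errors)

-- ===== LEMMAS AND PROOFS =====

-- the per-category total both ports compute
def pvTot (errors : List (String × List (String × Int))) : Int :=
  ((errors.map Prod.snd).map (fun error_data => (PySem.Dict.mk error_data).getD "count" 0)).sum

-- the single argmax step of Python's max(…, key=…) fold, as a named function
def pvStep {α : Type} (key : α → Int) (o : Option α) (x : α) : Option α :=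
  match o with
  | none => some x
  | some m => if key m < key x then some x else some m

-- max? IS the foldl of pvStep (bridging PySem's matcher to pvStep pointwise)
lemma pv_max_eq_foldl_step {α : Type} (xs : List α) (key : α → Int) :
    PySem.List.max? xs key = xs.foldl (pvStep key) none := by
  rw [PySem.List.max?]
  exact PySem.List.foldl_congr_mem xs _ _ none (fun acc x _ => by cases acc <;> rfl)

-- head of one insertion step of the stable sort by negated key = one argmax step
lemma pv_head_insertBy {α : Type} (f : α → Int) (x : α) (acc : List α) :
    (PySem.List.insertBy (fun a b => decide ((-(f a)) < (-(f b)))) x acc).head? =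
      pvStep f acc.head? x := by
  cases acc with
  | nil => rfl
  | cons m t =>
    simp only [PySem.List.insertBy, List.head?_cons, neg_lt_neg_iff, pvStep]
    by_cases h : f m < f x <;> simp [h]

-- head of the whole insertion-sort fold = the argmax fold
lemma pv_head_foldl {α : Type} (f : α → Int) :
    ∀ (l acc : List α),
      (l.foldl (fun acc x => PySem.List.insertBy (fun a b => decide ((-(f a)) < (-(f b)))) x acc) acc).head?
        = l.foldl (pvStep f) acc.head? := by
  intro l
  induction l with
  | nil => intro acc; rfl
  | cons x t ih =>
    intro acc
    simp only [List.foldl_cons]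
    rw [ih, pv_head_insertBy]

-- head of the stable sort by negated key IS Python's max(…, key=f) (first maximal element)
lemma pv_head_sorted {α : Type} (f : α → Int) (l : List α) :
    (PySem.List.sorted l (fun x => -(f x)) false).head? = PySem.List.max? l f := by
  rw [PySem.List.sorted_eq_foldl_insertBy, pv_max_eq_foldl_step]
  exact pv_head_foldl f l []

-- argmax over the keys with a key function that agrees with the pair totals = fst of the argmax over the pairs
lemma pv_max_aux {β : Type} (g : String → Int) (f : (String × β) → Int) :
    ∀ (l : List (String × β)) (accP : Option (String × β)),
      (∀ p ∈ l, g p.1 = f p) → (∀ m, accP = some m → g m.1 = f m) →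
      (l.map Prod.fst).foldl (pvStep g) (accP.map Prod.fst)
      = (l.foldl (pvStep f) accP).map Prod.fst := by
  intro l
  induction l with
  | nil => intro accP _ _; rfl
  | cons p t ih =>
    intro accP hl hacc
    have hp : g p.1 = f p := hl p (by simp)
    have ht : ∀ q ∈ t, g q.1 = f q := fun q hq => hl q (by simp [hq])
    simp only [List.map_cons, List.foldl_cons]
    cases accP with
    | none =>
      exact ih (some p) ht (fun m hm => (Option.some.inj hm) ▸ hp)
    | some m =>
      have hm : g m.1 = f m := hacc m rfl
      simp only [Option.map_some, pvStep]
      by_cases h : f m < f p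
      · have h' : g m.1 < g p.1 := by rw [hm, hp]; exact h
        simp only [h, if_pos h']
        exact ih (some p) ht (fun m' hm' => (Option.some.inj hm') ▸ hp)
      · have h' : ¬ g m.1 < g p.1 := by rw [hm, hp]; exact h
        simp only [h, if_neg h']
        exact ih (some m) ht (fun m' hm' => (Option.some.inj hm') ▸ hm)

lemma pv_max_map_fst {β : Type} (g : String → Int) (f : (String × β) → Int) (l : List (String × β))
    (h : ∀ p ∈ l, g p.1 = f p) :
    PySem.List.max? (l.map Prod.fst) g = (PySem.List.max? l f).map Prod.fst := by
  rw [pv_max_eq_foldl_step, pv_max_eq_foldl_step]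
  exact pv_max_aux g f l none h (by simp)

-- A re-stated through pvTot (definitional)
lemma pvA_eq (de : List (String × List (String × List (String × Int)))) :
    get_most_common_category_py de =
      (if de = [] then none else
        let cc := de.foldl (fun d p => d.insert p.1 (pvTot p.2)) PySem.Dict.empty
        if cc.size ≠ 0 then PySem.List.max? cc.keys (fun k => cc.getD k 0) else none) := rfl

-- B re-stated: fst of the head of the stable sort
lemma pvB_eq (de : List (String × List (String × List (String × Int)))) :
    get_most_common_category_py_alt de
      = ((PySem.List.sorted de (fun p => -(pvTot p.2)) false).head?).map Prod.fst := by
  unfold get_most_common_category_py_alt pvTot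
  cases h : PySem.List.sorted de (fun p => -(pvTot p.2)) false <;>
    simp_all [pvTot]

-- ===== VERDICT (by name: the statement is the Claim_ definition above) =====
theorem get_most_common_category_py_spec : Claim_equal_get_most_common_category_py := by
  intro de _ hpre
  unfold Spec_get_most_common_category_py
  obtain ⟨hnd, _⟩ := hpre
  rw [pvB_eq, pv_head_sorted]
  cases de with
  | nil => rfl
  | cons p0 rest =>
    have hne : (p0 :: rest : List (String × List (String × List (String × Int)))) ≠ [] := by simp
    have hitems :
        ((p0 :: rest).foldl (fun d p => d.insert p.1 (pvTot p.2)) PySem.Dict.empty).items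
          = (p0 :: rest).map (fun p => (p.1, pvTot p.2)) := by
      have h := PySem.Dict.items_foldl_insert_fresh (p0 :: rest) Prod.fst
        (fun p => pvTot p.2) PySem.Dict.empty
        (fun a _ => PySem.Dict.contains_empty a.1) hnd
      simpa using h
    rw [pvA_eq, if_neg hne]
    set D := (p0 :: rest).foldl (fun d p => d.insert p.1 (pvTot p.2)) PySem.Dict.empty with hD
    have hkeys : D.keys = (p0 :: rest).map Prod.fst := by
      simp [PySem.Dict.keys, hitems, List.map_map]
    have hsize : D.size ≠ 0 := by
      simp [PySem.Dict.size, hitems]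
    have hg : ∀ p ∈ (p0 :: rest), D.getD p.1 0 = pvTot p.2 := by
      intro p hp
      apply PySem.Dict.getD_of_mem_items
      · rw [hitems]
        exact List.mem_map_of_mem hp
      · rw [hkeys]; exact hnd
    simp only [if_pos hsize]
    rw [hkeys]
    exact pv_max_map_fst (fun k => D.getD k 0) (fun p => pvTot p.2) (p0 :: rest) hg
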